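-- pv_equiv track=rewrite | github.com/KatlaSathwik/AI-Talent-Scout | app/agents/scorer.py | _are_domains_related
-- ===== SOURCE A (Python) =====
-- def _are_domains_related(domain1: str, domain2: str) -> bool:
--     """Check if two domains are related."""
--     related_domains = {
--         "tech": ["software", "it", "information technology", "web", "mobile"],
--         "finance": ["banking", "investment", "insurance", "fintech"],
--         "healthcare": ["medical", "hospital", "clinical", "pharma"],
--         "data science": ["analytics", "data", "ml", "ai", "machine learning", "artificial intelligence"]
--     }
--
--     # Check if domains are in the same category
--     for category, domains in related_domains.items():
--         if domain1 == category or domain1 in domains: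
--             if domain2 == category or domain2 in domains:
--                 return True
--
--     return False
-- ===== SOURCE B (Python) =====
-- def _are_domains_related(domain1: str, domain2: str) -> bool:
--     """Check if two domains are related."""
--     related_domains = {
--         "tech": ["software", "it", "information technology", "web", "mobile"],
--         "finance": ["banking", "investment", "insurance", "fintech"],
--         "healthcare": ["medical", "hospital", "clinical", "pharma"],
--         "data science": ["analytics", "data", "ml", "ai", "machine learning", "artificial intelligence"]
--     }
--
--     # Build a reverse index: term -> its category (each term occurs in exactly one category).
--     lookup = {}
--     for category, members in related_domains.items():
--         lookup[category] = category
--         for m in members: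
--             lookup[m] = category
--
--     cat1 = lookup.get(domain1)
--     return cat1 is not None and cat1 == lookup.get(domain2)
-- ===== Notes on version B (the rewrite author's own statement) =====
-- stated objective: simpler
-- what changed: Replaces the nested category-scanning loop (with its inner membership test per category) by building a reverse term-to-category index once and comparing two direct lookups.
import Mathlib
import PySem

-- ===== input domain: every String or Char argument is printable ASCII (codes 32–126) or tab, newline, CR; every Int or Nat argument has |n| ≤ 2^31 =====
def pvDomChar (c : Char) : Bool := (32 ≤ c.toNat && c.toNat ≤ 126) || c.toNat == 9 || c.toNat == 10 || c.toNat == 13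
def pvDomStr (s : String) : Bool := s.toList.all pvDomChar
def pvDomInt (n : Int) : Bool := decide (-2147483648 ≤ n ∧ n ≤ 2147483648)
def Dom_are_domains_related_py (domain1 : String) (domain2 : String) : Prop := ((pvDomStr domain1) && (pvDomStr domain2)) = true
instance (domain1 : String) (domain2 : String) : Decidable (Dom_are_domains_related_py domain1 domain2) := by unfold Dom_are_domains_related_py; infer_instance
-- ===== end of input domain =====

-- B replaces A's nested category scan by one reverse term→category index and two lookups (objective: simpler).

-- ===== PORT A =====
-- A's dict literal, as an insertion-ordered association list.
def aRelatedDomains : List (String × List String) :=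
  [("tech", ["software", "it", "information technology", "web", "mobile"]),
   ("finance", ["banking", "investment", "insurance", "fintech"]),
   ("healthcare", ["medical", "hospital", "clinical", "pharma"]),
   ("data science", ["analytics", "data", "ml", "ai", "machine learning", "artificial intelligence"])]

-- the 'for category, domains in related_domains.items()' loop, step for step
def aLoop (domain1 domain2 : String) : List (String × List String) → Bool
  | [] => false
  | (category, domains) :: rest =>
    if domain1 == category || domains.contains domain1 then
      if domain2 == category || domains.contains domain2 then true
      else aLoop domain1 domain2 rest
    else aLoop domain1 domain2 rest

def are_domains_related_py (domain1 : String) (domain2 : String) : Bool :=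
  aLoop domain1 domain2 aRelatedDomains

-- ===== PORT B =====
def bRelatedDomains : List (String × List String) :=
  [("tech", ["software", "it", "information technology", "web", "mobile"]),
   ("finance", ["banking", "investment", "insurance", "fintech"]),
   ("healthcare", ["medical", "hospital", "clinical", "pharma"]),
   ("data science", ["analytics", "data", "ml", "ai", "machine learning", "artificial intelligence"])]

-- the index-building loop of B: lookup[category] = category; lookup[m] = category for each member
def bLookup : PySem.Dict String String :=
  bRelatedDomains.foldl
    (fun d p => p.2.foldl (fun d m => d.insert m p.1) (d.insert p.1 p.1))
    PySem.Dict.empty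

def are_domains_related_py_alt (domain1 : String) (domain2 : String) : Bool :=
  match bLookup.get? domain1 with
  | none => false
  | some cat1 =>
    match bLookup.get? domain2 with
    | none => false
    | some cat2 => cat1 == cat2

-- ===== PRECONDITION & SPEC =====
def Spec_are_domains_related_py (domain1 : String) (domain2 : String) (out : Bool) : Prop := out = are_domains_related_py_alt domain1 domain2
instance (domain1 : String) (domain2 : String) (out : Bool) : Decidable (Spec_are_domains_related_py domain1 domain2 out) := by unfold Spec_are_domains_related_py; infer_instance

-- ===== CLAIM (what is proved, stated in full; the proofs are below) =====
def Claim_equal_are_domains_related_py : Prop := ∀ (domain1 : String) (domain2 : String), Dom_are_domains_related_py domain1 domain2 → Spec_are_domains_related_py domain1 domain2 (are_domains_related_py domain1 domain2)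

-- ===== LEMMAS AND PROOFS =====
-- the 23 strings that occur anywhere in the table (proof-side helper)
def pvTerms : List String :=
  ["tech","software","it","information technology","web","mobile",
   "finance","banking","investment","insurance","fintech",
   "healthcare","medical","hospital","clinical","pharma",
   "data science","analytics","data","ml","ai","machine learning","artificial intelligence"]

-- the built index, evaluated once (closed term)
set_option maxHeartbeats 2000000 in
lemma bLookup_eq : bLookup = PySem.Dict.mk
  [("tech","tech"),("software","tech"),("it","tech"),("information technology","tech"),("web","tech"),("mobile","tech"),
   ("finance","finance"),("banking","finance"),("investment","finance"),("insurance","finance"),("fintech","finance"),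
   ("healthcare","healthcare"),("medical","healthcare"),("hospital","healthcare"),("clinical","healthcare"),("pharma","healthcare"),
   ("data science","data science"),("analytics","data science"),("data","data science"),("ml","data science"),("ai","data science"),("machine learning","data science"),("artificial intelligence","data science")] := by
  decide

lemma lk_none (d : String) (h : ¬ (pvTerms.contains d = true)) : bLookup.get? d = none := by
  simp [pvTerms] at h
  simp [bLookup_eq, PySem.Dict.get?, Ne.symm, h]

lemma aLoop_snd_none (d1 d2 : String) (h : ¬ (pvTerms.contains d2 = true)) :
    aLoop d1 d2 aRelatedDomains = false := by
  simp [pvTerms] at h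
  obtain ⟨h1,h2,h3,h4,h5,h6,h7,h8,h9,h10,h11,h12,h13,h14,h15,h16,h17,h18,h19,h20,h21,h22,h23⟩ := h
  simp [aRelatedDomains, aLoop, h1,h2,h3,h4,h5,h6,h7,h8,h9,h10,h11,h12,h13,h14,h15,h16,h17,h18,h19,h20,h21,h22,h23]

lemma aLoop_fst_none (d1 d2 : String) (h : ¬ (pvTerms.contains d1 = true)) :
    aLoop d1 d2 aRelatedDomains = false := by
  simp [pvTerms] at h
  obtain ⟨h1,h2,h3,h4,h5,h6,h7,h8,h9,h10,h11,h12,h13,h14,h15,h16,h17,h18,h19,h20,h21,h22,h23⟩ := h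
  simp [aRelatedDomains, aLoop, h1,h2,h3,h4,h5,h6,h7,h8,h9,h10,h11,h12,h13,h14,h15,h16,h17,h18,h19,h20,h21,h22,h23]

-- ===== VERDICT (by name: the statement is the Claim_ definition above) =====
set_option maxHeartbeats 4000000 in
theorem are_domains_related_py_spec : Claim_equal_are_domains_related_py := by
  intro d1 d2 _
  unfold Spec_are_domains_related_py
  by_cases h1 : pvTerms.contains d1 = true
  · by_cases h2 : pvTerms.contains d2 = true
    · simp only [pvTerms] at h1 h2
      simp only [List.contains_cons, List.contains_nil, Bool.or_eq_true, beq_iff_eq,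
        Bool.or_false] at h1 h2
      rcases h1 with (h|h|h|h|h|h|h|h|h|h|h|h|h|h|h|h|h|h|h|h|h|h|h) <;> subst h <;>
        (rcases h2 with (h|h|h|h|h|h|h|h|h|h|h|h|h|h|h|h|h|h|h|h|h|h|h) <;> subst h <;> decide)
    · rw [are_domains_related_py, aLoop_snd_none d1 d2 h2]
      rw [are_domains_related_py_alt, lk_none d2 h2]
      cases bLookup.get? d1 <;> rfl
  · rw [are_domains_related_py, aLoop_fst_none d1 d2 h1]
    rw [are_domains_related_py_alt, lk_none d1 h1]
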